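-- pv_equiv track=rewrite | github.com/Elahe-khayatian/sKRF-distances | sKfunctions.py | get_skDistance
-- ===== SOURCE A (Python) =====
-- def get_skDistance(P_Total):
--  d_Total=[]
--  for i in range(len(P_Total)):
--   d=[]
--   P_Supp=[]
--   for p in P_Total[i]:
--     if p not in P_Supp:
--        P_Supp.append(p)
--   for j in range(len(P_Total)):
--     d_k=len(P_Total[i])+len(P_Total[j])
--     for p in P_Supp:
--         if P_Total[i].count(p)> P_Total[j].count(p):
--             d_k=d_k-2*(P_Total[j].count(p))
--         else:
--             d_k=d_k-2*(P_Total[i].count(p))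
--     d.append(d_k)
--   d_Total.append(d)
--  return(d_Total)
-- ===== SOURCE B (Python) =====
-- def get_skDistance(P_Total):
--     # Sort each list once; the size of the multiset intersection of two sorted
--     # lists is found by a linear two-pointer merge, and d(i,j) = n_i + n_j - 2*|inter|.
--     S = [sorted(l) for l in P_Total]
--
--     def common(a, b):  # two-pointer merge over two ascending lists
--         i = j = c = 0
--         while i < len(a) and j < len(b):
--             if a[i] < b[j]:
--                 i += 1
--             elif b[j] < a[i]:
--                 j += 1
--             else:
--                 c += 1
--                 i += 1
--                 j += 1
--         return c
--
--     return [[len(a) + len(b) - 2 * common(a, b) for b in S] for a in S]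
-- ===== Notes on version B (the rewrite author's own statement) =====
-- stated objective: faster
-- what changed: B sorts every list once and computes each pairwise multiset-intersection size by a linear two-pointer merge of the two sorted lists (d = len_i + len_j - 2*|intersection|), instead of A's per-pair scan of i's support with repeated .count passes over both lists.
import Mathlib
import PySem

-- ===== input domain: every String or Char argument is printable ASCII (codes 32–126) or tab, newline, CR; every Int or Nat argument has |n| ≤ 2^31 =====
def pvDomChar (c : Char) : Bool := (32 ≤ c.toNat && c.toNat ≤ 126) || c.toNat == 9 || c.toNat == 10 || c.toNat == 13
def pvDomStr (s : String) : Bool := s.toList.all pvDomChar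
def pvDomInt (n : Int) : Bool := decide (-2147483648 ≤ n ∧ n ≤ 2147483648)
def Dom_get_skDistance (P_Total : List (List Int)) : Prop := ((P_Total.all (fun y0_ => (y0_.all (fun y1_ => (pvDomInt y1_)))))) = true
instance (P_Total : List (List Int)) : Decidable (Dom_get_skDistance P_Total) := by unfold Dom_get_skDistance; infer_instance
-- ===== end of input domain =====

-- B sorts each list once and gets each pairwise multiset-intersection size by a
-- two-pointer merge of the sorted lists (objective: faster, removes repeated .count scans).


-- ===== PORT A =====
def get_skDistance (P_Total : List (List Int)) : List (List Int) :=
  P_Total.foldl (fun d_Total li =>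
    d_Total ++
      [P_Total.foldl (fun d lj =>
        d ++ [(li.foldl (fun acc p => if acc.contains p then acc else acc ++ [p]) []).foldl
          (fun d_k p =>
            if (PySem.List.count li p : Int) > (PySem.List.count lj p : Int) then
              d_k - 2 * (PySem.List.count lj p : Int)
            else
              d_k - 2 * (PySem.List.count li p : Int)) ((li.length : Int) + (lj.length : Int))]) []]) []

-- ===== PORT B =====
-- Source B's two-pointer merge over two ascending lists: advancing index i/j = consuming the head.
def pvCommon : List Int → List Int → Int
  | [], _ => 0
  | _ :: _, [] => 0
  | x :: xs, y :: ys =>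
      if x < y then pvCommon xs (y :: ys)
      else if y < x then pvCommon (x :: xs) ys
      else 1 + pvCommon xs ys
termination_by a b => a.length + b.length

def get_skDistance_alt (P_Total : List (List Int)) : List (List Int) :=
  let S := P_Total.map (fun l => PySem.List.sorted l (fun x => x) false)
  S.map (fun a => S.map (fun b => (a.length : Int) + (b.length : Int) - 2 * pvCommon a b))

-- ===== PRECONDITION & SPEC =====
def Spec_get_skDistance (P_Total : List (List Int)) (out : List (List Int)) : Prop := out = get_skDistance_alt P_Total
instance (P_Total : List (List Int)) (out : List (List Int)) : Decidable (Spec_get_skDistance P_Total out) := by unfold Spec_get_skDistance; infer_instance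

-- ===== CLAIM (what is proved, stated in full; the proofs are below) =====
def Claim_equal_get_skDistance : Prop := ∀ (P_Total : List (List Int)), Dom_get_skDistance P_Total → Spec_get_skDistance P_Total (get_skDistance P_Total)

-- ===== LEMMAS AND PROOFS =====

-- A's P_Supp loop is exactly Set.ofList (ordered dedup).
lemma supp_eq_ofList (li : List Int) :
    li.foldl (fun acc p => if acc.contains p then acc else acc ++ [p]) [] = PySem.Set.ofList li := by
  rw [PySem.Set.ofList_eq_foldl]; rfl

-- A's subtraction loop, as a closed sum over the support.
lemma aEntry_eq (li lj : List Int) (s : Int) (supp : List Int) :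
    supp.foldl (fun d_k p =>
      if (PySem.List.count li p : Int) > (PySem.List.count lj p : Int) then
        d_k - 2 * (PySem.List.count lj p : Int)
      else
        d_k - 2 * (PySem.List.count li p : Int)) s
    = s - 2 * (supp.map (fun p =>
        min (PySem.List.count li p : Int) (PySem.List.count lj p : Int))).sum := by
  induction supp generalizing s with
  | nil => simp
  | cons p t ih =>
      simp only [List.foldl_cons, List.map_cons, List.sum_cons, ih]
      by_cases h : (PySem.List.count li p : Int) > (PySem.List.count lj p : Int)
      · rw [if_pos h, min_eq_right (le_of_lt h)]; ring
      · rw [if_neg h, min_eq_left (by omega)]; ring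

-- Two-pointer merge of ascending lists computes the multiset-intersection size.
lemma pvCommon_eq_card_inter (a b : List Int)
    (ha : a.Pairwise (· ≤ ·)) (hb : b.Pairwise (· ≤ ·)) :
    pvCommon a b = (Multiset.card ((a : Multiset Int) ∩ (b : Multiset Int)) : Int) := by
  induction a, b using pvCommon.induct with
  | case1 b => simp [pvCommon]
  | case2 x xs => simp [pvCommon]
  | case3 x xs y ys hxy ih =>
      have hxnb : x ∉ (y :: ys) := by
        intro hmem
        rcases List.mem_cons.mp hmem with h | h
        · omega
        · have := (List.pairwise_cons.mp hb).1 x h; omega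
      rw [pvCommon, if_pos hxy, ih (List.Pairwise.of_cons ha) hb]
      have : ((x :: xs : List Int) : Multiset Int) ∩ (↑(y :: ys)) = (↑xs) ∩ (↑(y :: ys)) := by
        rw [← Multiset.cons_coe, ← Multiset.cons_coe]
        exact Multiset.cons_inter_of_neg _ (by simpa using hxnb)
      rw [this]
  | case4 x xs y ys hxy hyx ih =>
      have hyna : y ∉ (x :: xs) := by
        intro hmem
        rcases List.mem_cons.mp hmem with h | h
        · omega
        · have := (List.pairwise_cons.mp ha).1 y h; omega
      rw [pvCommon, if_neg hxy, if_pos hyx, ih ha (List.Pairwise.of_cons hb)]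
      have : ((x :: xs : List Int) : Multiset Int) ∩ (↑(y :: ys)) = (↑(x :: xs)) ∩ (↑ys) := by
        rw [Multiset.inter_comm, ← Multiset.cons_coe, ← Multiset.cons_coe,
            Multiset.cons_inter_of_neg _ (by simpa using hyna), Multiset.inter_comm]
      rw [this]
  | case5 x xs y ys hxy hyx ih =>
      have hxy' : x = y := by omega
      subst hxy'
      rw [pvCommon, if_neg hxy, if_neg hyx, ih (List.Pairwise.of_cons ha) (List.Pairwise.of_cons hb)]
      have : ((x :: xs : List Int) : Multiset Int) ∩ (↑(x :: ys)) = x ::ₘ ((↑xs) ∩ (↑ys)) := by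
        rw [show ((x :: xs : List Int) : Multiset Int) = x ::ₘ (↑xs) from rfl,
            Multiset.cons_inter_of_pos _ (by simp),
            show ((x :: ys : List Int) : Multiset Int) = x ::ₘ (↑ys) from rfl,
            Multiset.erase_cons_head]
      rw [this]; simp; ring

-- A's support sum is the multiset-intersection size too.
lemma sum_min_eq_card_inter (li lj : List Int) :
    ((PySem.Set.ofList li).map (fun p => min (li.count p) (lj.count p))).sum
      = Multiset.card ((li : Multiset Int) ∩ (lj : Multiset Int)) := by
  rw [← List.sum_toFinset _ (PySem.Set.nodup_ofList li)]
  have htf : (PySem.Set.ofList li).toFinset = li.toFinset := by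
    ext p; simp [PySem.Set.mem_ofList]
  rw [htf]
  have hsub : ((li : Multiset Int) ∩ (lj : Multiset Int)).toFinset ⊆ li.toFinset := by
    intro p hp
    simp only [Multiset.mem_toFinset, Multiset.mem_inter] at hp
    simpa [List.mem_toFinset] using hp.1
  have h1 : ∑ p ∈ li.toFinset, min (li.count p) (lj.count p)
      = ∑ p ∈ li.toFinset, Multiset.count p ((li : Multiset Int) ∩ (lj : Multiset Int)) :=
    Finset.sum_congr rfl (fun p _ => by simp [Multiset.coe_count])
  have h2 : ∑ p ∈ ((li : Multiset Int) ∩ (lj : Multiset Int)).toFinset,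
        Multiset.count p ((li : Multiset Int) ∩ (lj : Multiset Int))
      = ∑ p ∈ li.toFinset, Multiset.count p ((li : Multiset Int) ∩ (lj : Multiset Int)) :=
    Finset.sum_subset hsub (fun p _ hp =>
      Multiset.count_eq_zero_of_notMem (by simpa using hp))
  rw [h1, ← h2, Multiset.toFinset_sum_count_eq]

-- ===== VERDICT (by name: the statement is the Claim_ definition above) =====
theorem get_skDistance_spec : Claim_equal_get_skDistance := by
  intro P_Total _
  show get_skDistance P_Total = get_skDistance_alt P_Total
  unfold get_skDistance get_skDistance_alt
  simp only [PySem.List.foldl_append_singleton_eq_map, List.nil_append, List.map_map]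
  apply List.map_congr_left
  intro li _
  apply List.map_congr_left
  intro lj _
  simp only [Function.comp]
  rw [supp_eq_ofList, aEntry_eq]
  have hperm_i := PySem.List.sorted_perm li (fun x => x) false
  have hperm_j := PySem.List.sorted_perm lj (fun x => x) false
  rw [PySem.List.length_sorted, PySem.List.length_sorted]
  rw [pvCommon_eq_card_inter _ _
        (by simpa using PySem.List.sorted_pairwise li (fun x => x))
        (by simpa using PySem.List.sorted_pairwise lj (fun x => x))]
  rw [Multiset.coe_eq_coe.mpr hperm_i, Multiset.coe_eq_coe.mpr hperm_j]
  have : ((PySem.Set.ofList li).map (fun p =>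
      min (PySem.List.count li p : Int) (PySem.List.count lj p : Int))).sum
      = ((Multiset.card ((li : Multiset Int) ∩ (lj : Multiset Int)) : Nat) : Int) := by
    rw [← sum_min_eq_card_inter li lj, Nat.cast_list_sum, List.map_map]
    refine congrArg _ (List.map_congr_left (fun p _ => ?_))
    simp [Function.comp, PySem.List.count, Nat.cast_min]
  rw [this]
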